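-- pv_equiv track=rewrite | github.com/ElCubeh/FP1 | Especial/Ejercicios_semanales/SEMANA11/Etiquetador/string_utils.py | tagger
-- ===== SOURCE A (Python) =====
-- def tagger(text, alphabet):
--     words = text.split()
--     new_words = []
--     for word in words:
--         if all(char in alphabet for char in words):
--             new_word = "[target]" + word + "[endtarget]"
--             new_words.append(new_word)
--         else:
--             new_words.append(word)
--     return " ".join(new_words)
-- ===== SOURCE B (Python) =====
-- def tagger(text, alphabet):
--     words = text.split()
--     if all(w in alphabet for w in words):
--         return " ".join("[target]" + w + "[endtarget]" for w in words)
--     return " ".join(words)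
-- ===== Notes on version B (the rewrite author's own statement) =====
-- stated objective: simpler
-- what changed: A's per-word guard all(char in alphabet for char in words) iterates over the whole word list (not the word's characters), so it is loop-invariant; B evaluates that condition once and then builds the output in a single pass (tagging every word or none), replacing A's loop-with-accumulator and nested re-scan.
import Mathlib
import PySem

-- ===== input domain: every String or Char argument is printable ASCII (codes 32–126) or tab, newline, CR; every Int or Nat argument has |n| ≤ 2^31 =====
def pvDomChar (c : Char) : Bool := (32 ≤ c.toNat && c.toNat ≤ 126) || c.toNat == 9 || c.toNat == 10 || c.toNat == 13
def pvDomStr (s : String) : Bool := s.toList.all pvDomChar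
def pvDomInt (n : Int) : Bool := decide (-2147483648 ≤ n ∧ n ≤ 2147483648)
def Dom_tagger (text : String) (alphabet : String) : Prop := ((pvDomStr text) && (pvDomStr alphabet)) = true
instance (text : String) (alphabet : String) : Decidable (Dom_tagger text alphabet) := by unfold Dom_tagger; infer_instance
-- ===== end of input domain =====

-- B hoists A's loop-invariant guard (which re-scans the word list per word) out of the loop and builds the output in one pass: simpler, one condition check plus one pass.


-- ===== PORT A =====
-- Port of A: per-word loop whose guard re-tests every word of the list each iteration.
def tagger (text : String) (alphabet : String) : String :=
  let words := PySem.Str.split₀ text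
  let newWords := words.foldl
    (fun acc word =>
      if words.all (fun w => PySem.Str.isIn w alphabet) then
        acc ++ ["[target]" ++ word ++ "[endtarget]"]
      else
        acc ++ [word]) []
  PySem.Str.join " " newWords

-- ===== PORT B =====
-- Port of B: the loop-invariant condition computed once, then a single output pass.
def tagger_alt (text : String) (alphabet : String) : String :=
  let words := PySem.Str.split₀ text
  if words.all (fun w => PySem.Str.isIn w alphabet) then
    PySem.Str.join " " (words.map (fun w => "[target]" ++ w ++ "[endtarget]"))
  else
    PySem.Str.join " " words

-- ===== PRECONDITION & SPEC =====
def Spec_tagger (text : String) (alphabet : String) (out : String) : Prop := out = tagger_alt text alphabet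
instance (text : String) (alphabet : String) (out : String) : Decidable (Spec_tagger text alphabet out) := by unfold Spec_tagger; infer_instance

-- ===== CLAIM (what is proved, stated in full; the proofs are below) =====
def Claim_equal_tagger : Prop := ∀ (text : String) (alphabet : String), Dom_tagger text alphabet → Spec_tagger text alphabet (tagger text alphabet)

-- ===== LEMMAS AND PROOFS =====

-- ===== VERDICT (by name: the statement is the Claim_ definition above) =====
theorem tagger_spec : Claim_equal_tagger := by
  intro text alphabet _
  unfold Spec_tagger tagger tagger_alt
  by_cases h : ((PySem.Str.split₀ text).all fun w => PySem.Str.isIn w alphabet) = true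
  · simp only [h, if_true]
    rw [PySem.List.foldl_append_singleton_eq_map
        (f := fun w => "[target]" ++ w ++ "[endtarget]")]
    simp
  · simp only [h, Bool.false_eq_true, if_false]
    rw [show ((PySem.Str.split₀ text).foldl (fun acc w => acc ++ [w]) ([] : List String))
          = PySem.Str.split₀ text from by
        simpa using PySem.List.foldl_append_singleton_eq_map (f := id)
          (l := PySem.Str.split₀ text) (acc := [])]
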